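-- pv_equiv track=rewrite | github.com/jmajkutewicz/EditPrefs | wikiprefs/diffs/diff_creation.py | _fix_tokenized_math
-- ===== SOURCE A (Python) =====
-- def _fix_tokenized_math(tokens):
--     """Re-joins <math> and </math> if they were split during tokenization by spacy
--
--     This allows to treat a quote as a single "line" during diff creation and avoid breaking it up
--     """
--     fixed_tokens = []
--     in_math = False
--     math_content = []
--
--     for token in tokens:
--         if '<math' in token:
--             # Start collecting math content
--             if in_math:
--                 # If already in math mode, just continue collecting
--                 math_content.append(token)
--             else:
--                 # Start a new math content collection
--                 in_math = True
--                 math_content = [token]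
--         elif '</math>' in token:
--             # Append current token to math content and close math block
--             math_content.append(token)
--             fixed_tokens.append(' '.join(math_content))
--             math_content = []
--             in_math = False
--         elif in_math:
--             # Continue collecting math content if within a math block
--             math_content.append(token)
--         else:
--             # Normal token, not within a math block
--             fixed_tokens.append(token)
--
--     # Handle case where there's no closing </math> tag
--     if in_math:
--         fixed_tokens.extend(math_content)
--
--     return fixed_tokens
-- ===== SOURCE B (Python) =====
-- def _fix_tokenized_math(tokens):
--     """Lookahead grouping: on a '<math' token, scan ahead for the closing token
--     and emit the joined block at once; no in_math flag or running buffer."""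
--     out = []
--     i = 0
--     n = len(tokens)
--     while i < n:
--         t = tokens[i]
--         if '<math' not in t:
--             out.append(t)
--             i += 1
--             continue
--         block = [t]
--         j = i + 1
--         while j < n:
--             u = tokens[j]
--             block.append(u)
--             if '</math>' in u and '<math' not in u:
--                 out.append(' '.join(block))
--                 break
--             j += 1
--         else:
--             out.extend(block)
--             return out
--         i = j + 1
--     return out
-- ===== Notes on version B (the rewrite author's own statement) =====
-- stated objective: alternative
-- what changed: Replaced A's streaming in_math-flag state machine with a running buffer by an index-driven lookahead grouping: on a '<math' token B scans ahead for the closing token and emits the joined block at once (or the raw tail if unclosed).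
import Mathlib
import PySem

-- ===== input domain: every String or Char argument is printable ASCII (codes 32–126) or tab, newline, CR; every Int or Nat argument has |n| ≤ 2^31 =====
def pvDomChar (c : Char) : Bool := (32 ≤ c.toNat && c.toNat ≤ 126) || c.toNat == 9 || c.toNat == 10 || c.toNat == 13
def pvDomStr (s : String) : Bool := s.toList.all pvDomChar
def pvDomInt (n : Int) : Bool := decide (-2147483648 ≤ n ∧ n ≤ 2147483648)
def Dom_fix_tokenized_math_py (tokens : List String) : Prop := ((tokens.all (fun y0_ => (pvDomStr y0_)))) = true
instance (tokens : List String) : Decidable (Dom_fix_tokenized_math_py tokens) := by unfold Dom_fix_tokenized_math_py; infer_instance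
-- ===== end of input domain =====

-- B replaces A's streaming in_math-flag state machine by lookahead grouping (scan ahead
-- for the closing token and emit the joined block at once); objective: alternative decomposition.

-- ===== PORT A =====
-- A's loop body; state = (fixed_tokens, in_math, math_content)
def pvStepA (st : List String × Bool × List String) (token : String) :
    List String × Bool × List String :=
  if PySem.Str.isIn "<math" token then
    if st.2.1 then (st.1, true, st.2.2 ++ [token])
    else (st.1, true, [token])
  else if PySem.Str.isIn "</math>" token then
    (st.1 ++ [PySem.Str.join " " (st.2.2 ++ [token])], false, [])
  else if st.2.1 then (st.1, true, st.2.2 ++ [token])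
  else (st.1 ++ [token], st.2.1, st.2.2)

def fix_tokenized_math_py (tokens : List String) : List String :=
  let st := tokens.foldl pvStepA ([], false, [])
  if st.2.1 then st.1 ++ st.2.2 else st.1

-- ===== PORT B =====
-- inner lookahead scan of Source B: collect tokens up to and including the closer; none = no closer found
def pvFindClose : List String → Option (List String × List String)
  | [] => none
  | u :: rest =>
    if PySem.Str.isIn "</math>" u && !(PySem.Str.isIn "<math" u) then some ([u], rest)
    else
      match pvFindClose rest with
      | none => none
      | some (blk, rem) => some (u :: blk, rem)

-- termination measure for B's outer loop (resuming after the consumed block)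
theorem pvFindClose_length : ∀ (ts blk rem : List String),
    pvFindClose ts = some (blk, rem) → rem.length < ts.length := by
  intro ts
  induction ts with
  | nil => intro blk rem h; simp [pvFindClose] at h
  | cons u rest ih =>
    intro blk rem h
    rw [pvFindClose] at h
    split at h
    · injection h with h; injection h with _ h2; subst h2; simp
    · cases hfc : pvFindClose rest with
      | none => rw [hfc] at h; cases h
      | some p =>
        obtain ⟨b, r⟩ := p
        rw [hfc] at h
        injection h with h; injection h with _ h2; subst h2
        exact Nat.lt_succ_of_lt (ih b r hfc)

def fix_tokenized_math_py_alt : List String → List String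
  | [] => []
  | t :: rest =>
    if PySem.Str.isIn "<math" t then
      match h : pvFindClose rest with
      | some (blk, rem) =>
        PySem.Str.join " " (t :: blk) :: fix_tokenized_math_py_alt rem
      | none => t :: rest
    else t :: fix_tokenized_math_py_alt rest
termination_by ts => ts.length
decreasing_by
  · exact Nat.lt_succ_of_lt (pvFindClose_length _ _ _ h)
  · simp

-- ===== PRECONDITION & SPEC =====
def Spec_fix_tokenized_math_py (tokens : List String) (out : List String) : Prop := out = fix_tokenized_math_py_alt tokens
instance (tokens : List String) (out : List String) : Decidable (Spec_fix_tokenized_math_py tokens out) := by unfold Spec_fix_tokenized_math_py; infer_instance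

-- ===== CLAIM (what is proved, stated in full; the proofs are below) =====
def Claim_equal_fix_tokenized_math_py : Prop := ∀ (tokens : List String), Dom_fix_tokenized_math_py tokens → Spec_fix_tokenized_math_py tokens (fix_tokenized_math_py tokens)

-- ===== LEMMAS AND PROOFS =====

-- finishing step of A: flush the open buffer
def pvFinish (st : List String × Bool × List String) : List String :=
  if st.2.1 then st.1 ++ st.2.2 else st.1

theorem pvJoin_singleton (t : String) : PySem.Str.join " " [t] = t := by
  simp [PySem.Str.join, PySem.Chars.join, List.intercalate]

-- unfolding lemmas for B's well-founded definition
theorem pvAlt_cons_plain (t : String) (rest : List String)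
    (hm : PySem.Str.isIn "<math" t = false) :
    fix_tokenized_math_py_alt (t :: rest) = t :: fix_tokenized_math_py_alt rest := by
  rw [fix_tokenized_math_py_alt, if_neg (by rw [hm]; simp)]

theorem pvAlt_cons_open_none (t : String) (rest : List String)
    (hm : PySem.Str.isIn "<math" t = true) (hfc : pvFindClose rest = none) :
    fix_tokenized_math_py_alt (t :: rest) = t :: rest := by
  rw [fix_tokenized_math_py_alt, if_pos hm]
  split
  · next _ _ h => rw [hfc] at h; cases h
  · rfl

theorem pvAlt_cons_open_some (t : String) (rest blk rem : List String)
    (hm : PySem.Str.isIn "<math" t = true) (hfc : pvFindClose rest = some (blk, rem)) :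
    fix_tokenized_math_py_alt (t :: rest) =
      PySem.Str.join " " (t :: blk) :: fix_tokenized_math_py_alt rem := by
  rw [fix_tokenized_math_py_alt, if_pos hm]
  split
  · next b r h =>
    rw [hfc] at h
    injection h with h; injection h with h1 h2
    subst h1; subst h2; rfl
  · next h => rw [hfc] at h; cases h

-- A's loop in open (in_math = true) state, characterised by pvFindClose
theorem pvLoop_open : ∀ (ts : List String) (f mc : List String),
    pvFinish (ts.foldl pvStepA (f, true, mc)) =
      match pvFindClose ts with
      | none => f ++ mc ++ ts
      | some (blk, rem) =>
          pvFinish (rem.foldl pvStepA (f ++ [PySem.Str.join " " (mc ++ blk)], false, [])) := by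
  intro ts
  induction ts with
  | nil => intro f mc; simp [pvFindClose, pvFinish]
  | cons u rest ih =>
    intro f mc
    by_cases hm : PySem.Str.isIn "<math" u = true
    · -- nested opener while open: just collected
      have h1 : pvStepA (f, true, mc) u = (f, true, mc ++ [u]) := by
        unfold pvStepA; rw [if_pos hm]; rfl
      rw [List.foldl_cons, h1, ih, pvFindClose,
        if_neg (by rw [hm]; simp)]
      cases hfc : pvFindClose rest with
      | none => simp
      | some p => obtain ⟨blk, rem⟩ := p; simp
    · rw [Bool.not_eq_true] at hm
      by_cases hc : PySem.Str.isIn "</math>" u = true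
      · -- closing token
        have h1 : pvStepA (f, true, mc) u =
            (f ++ [PySem.Str.join " " (mc ++ [u])], false, []) := by
          unfold pvStepA; rw [if_neg (by rw [hm]; simp), if_pos hc]
        rw [List.foldl_cons, h1, pvFindClose, if_pos (by rw [hm, hc]; rfl)]
      · rw [Bool.not_eq_true] at hc
        -- plain token while open
        have h1 : pvStepA (f, true, mc) u = (f, true, mc ++ [u]) := by
          unfold pvStepA; rw [if_neg (by rw [hm]; simp), if_neg (by rw [hc]; simp)]; rfl
        rw [List.foldl_cons, h1, ih, pvFindClose,
          if_neg (by rw [hc]; simp)]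
        cases hfc : pvFindClose rest with
        | none => simp
        | some p => obtain ⟨blk, rem⟩ := p; simp

-- A's loop in closed state equals B, up to the accumulated prefix
theorem pvLoop_closed : ∀ (n : Nat) (ts f : List String), ts.length ≤ n →
    pvFinish (ts.foldl pvStepA (f, false, [])) = f ++ fix_tokenized_math_py_alt ts := by
  intro n
  induction n with
  | zero =>
    intro ts f h
    have : ts = [] := List.eq_nil_of_length_eq_zero (Nat.le_zero.mp h)
    subst this; simp [pvFinish, fix_tokenized_math_py_alt]
  | succ n ih =>
    intro ts f h
    cases ts with
    | nil => simp [pvFinish, fix_tokenized_math_py_alt]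
    | cons t rest =>
      simp only [List.length_cons, Nat.succ_le_succ_iff] at h
      by_cases hm : PySem.Str.isIn "<math" t = true
      · have h1 : pvStepA (f, false, []) t = (f, true, [t]) := by
          unfold pvStepA; rw [if_pos hm]; rfl
        rw [List.foldl_cons, h1, pvLoop_open]
        cases hfc : pvFindClose rest with
        | none => rw [pvAlt_cons_open_none t rest hm hfc]; simp
        | some p =>
          obtain ⟨blk, rem⟩ := p
          have hlt : rem.length < rest.length := pvFindClose_length _ _ _ hfc
          dsimp only
          rw [ih rem _ (Nat.le_of_lt (Nat.lt_of_lt_of_le hlt h)),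
            pvAlt_cons_open_some t rest blk rem hm hfc]
          simp
      · rw [Bool.not_eq_true] at hm
        -- non-opener: either a lone closer (joined as itself) or a plain token
        have h1 : pvStepA (f, false, []) t = (f ++ [t], false, []) := by
          unfold pvStepA; rw [if_neg (by rw [hm]; simp)]
          by_cases hc : PySem.Str.isIn "</math>" t = true
          · rw [if_pos hc]; simp [pvJoin_singleton]
          · rw [Bool.not_eq_true] at hc; rw [if_neg (by rw [hc]; simp)]; rfl
        rw [List.foldl_cons, h1, ih rest _ h, pvAlt_cons_plain t rest hm]
        simp

-- ===== VERDICT (by name: the statement is the Claim_ definition above) =====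
theorem fix_tokenized_math_py_spec : Claim_equal_fix_tokenized_math_py := by
  intro tokens _
  unfold Spec_fix_tokenized_math_py
  have := pvLoop_closed tokens.length tokens [] (Nat.le_refl _)
  simpa [fix_tokenized_math_py, pvFinish] using this
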